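-- pv_equiv track=rewrite | github.com/RetroZeus/Python-Challenges | odious.py | is_odious
-- ===== SOURCE A (Python) =====
-- def is_odious(num):
--     number_one = '1'
--     ones = ""
--     bin_num = str(bin(num))
--
--     for numbers in bin_num:
--         if number_one in numbers:
--             ones += number_one
--
--     if not len(ones) % 2 == 0:
--         return True
--     else:
--         return False
-- ===== SOURCE B (Python) =====
-- def is_odious(num):
--     n = abs(num)
--     parity = 0
--     while n:
--         parity ^= n & 1
--         n >>= 1
--     return parity == 1
-- ===== Notes on version B (the rewrite author's own statement) =====
-- stated objective: idiomatic
-- what changed: Replaces building bin(num)'s string and accumulating a string of '1' characters with a direct bit-shift loop on abs(num) maintaining a single parity bit.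
import Mathlib
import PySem

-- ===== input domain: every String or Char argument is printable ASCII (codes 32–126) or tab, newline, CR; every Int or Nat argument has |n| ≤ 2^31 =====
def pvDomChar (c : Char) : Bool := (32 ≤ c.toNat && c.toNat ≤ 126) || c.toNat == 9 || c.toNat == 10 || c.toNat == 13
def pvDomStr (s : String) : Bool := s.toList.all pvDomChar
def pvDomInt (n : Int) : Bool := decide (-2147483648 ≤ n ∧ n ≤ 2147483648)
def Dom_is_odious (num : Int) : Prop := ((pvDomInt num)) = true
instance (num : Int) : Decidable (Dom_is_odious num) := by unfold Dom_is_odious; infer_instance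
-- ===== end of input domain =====

-- B replaces A's scan over the characters of bin(num) with a bit-shift parity loop on abs(num); same values, idiomatic bit manipulation.

-- ===== PORT A =====
-- Python's bin(n) magnitude digits, most-significant first ([] for n = 0).
def pvBinDigits : Nat → List Char
  | 0 => []
  | n+1 => pvBinDigits ((n+1) / 2) ++ [if (n+1) % 2 = 1 then '1' else '0']
decreasing_by exact Nat.div_lt_self (Nat.succ_pos n) (by norm_num)

-- str(bin(num)) as a character list: optional '-', then "0b", then the digits ("0" for zero).
def pvBinStr (num : Int) : List Char :=
  (if num < 0 then ['-'] else []) ++ ['0', 'b'] ++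
    (if num.natAbs = 0 then ['0'] else pvBinDigits num.natAbs)

def is_odious (num : Int) : Bool :=
  -- number_one = '1'; ones = ""; accumulate '1' for each character equal to '1'
  let ones : List Char :=
    (pvBinStr num).foldl (fun acc c => if c = '1' then acc ++ ['1'] else acc) []
  if ¬ ones.length % 2 = 0 then true else false

-- ===== PORT B =====
def pvParityLoop (n p : Nat) : Nat :=
  if n = 0 then p else pvParityLoop (n / 2) (p ^^^ (n % 2))
decreasing_by exact Nat.div_lt_self (Nat.pos_of_ne_zero (by assumption)) (by norm_num)

def is_odious_alt (num : Int) : Bool :=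
  pvParityLoop num.natAbs 0 == 1

-- ===== PRECONDITION & SPEC =====
def Spec_is_odious (num : Int) (out : Bool) : Prop := out = is_odious_alt num
instance (num : Int) (out : Bool) : Decidable (Spec_is_odious num out) := by unfold Spec_is_odious; infer_instance

-- ===== CLAIM (what is proved, stated in full; the proofs are below) =====
def Claim_equal_is_odious : Prop := ∀ (num : Int), Dom_is_odious num → Spec_is_odious num (is_odious num)

-- ===== LEMMAS AND PROOFS =====

theorem foldl_ones_length (l : List Char) (acc : List Char) :
    (l.foldl (fun acc c => if c = '1' then acc ++ ['1'] else acc) acc).length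
      = acc.length + l.count '1' := by
  induction l generalizing acc with
  | nil => simp
  | cons c t ih =>
      simp only [List.foldl_cons, List.count_cons]
      by_cases h : c = '1'
      · rw [if_pos h, ih]
        subst h
        simp
        omega
      · have h' : ('1' == c) = false := beq_false_of_ne (Ne.symm h)
        rw [if_neg h, ih]
        simp [h]

theorem count_binDigits (n : Nat) :
    ∀ p, p < 2 → pvParityLoop n p = (p + (pvBinDigits n).count '1') % 2 := by
  induction n using Nat.strong_induction_on with
  | _ n ih =>
      intro p hp
      match n with
      | 0 =>
          rw [pvParityLoop, pvBinDigits]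
          simp; omega
      | Nat.succ m =>
          rw [pvParityLoop, pvBinDigits]
          have hlt : (m+1) / 2 < m + 1 := Nat.div_lt_self (Nat.succ_pos m) (by norm_num)
          have hr : (m+1) % 2 < 2 := Nat.mod_lt _ (by norm_num)
          have hxor : p ^^^ ((m+1) % 2) = (p + (m+1) % 2) % 2 := by
            rcases Nat.mod_two_eq_zero_or_one (m+1) with h | h <;> rw [h] <;>
              interval_cases p <;> decide
          rw [if_neg (Nat.succ_ne_zero m), ih _ hlt _ (by rw [hxor]; exact Nat.mod_lt _ (by norm_num))]
          rw [hxor, List.count_append]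
          by_cases h2 : (m+1) % 2 = 1
          · rw [if_pos h2, h2]
            simp only [List.count_singleton]
            norm_num
            omega
          · have h2' : (m+1) % 2 = 0 := by omega
            rw [if_neg h2, h2']
            simp

theorem count_binStr (num : Int) :
    (pvBinStr num).count '1' = (pvBinDigits num.natAbs).count '1' := by
  unfold pvBinStr
  by_cases h : num.natAbs = 0 <;> by_cases hn : num < 0 <;>
    simp [h, hn, pvBinDigits]

theorem is_odious_eq (num : Int) : is_odious num = is_odious_alt num := by
  unfold is_odious is_odious_alt
  simp only []
  rw [foldl_ones_length, count_binStr, count_binDigits _ 0 (by norm_num)]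
  simp only [List.length_nil, Nat.zero_add]
  rcases Nat.mod_two_eq_zero_or_one ((pvBinDigits num.natAbs).count '1') with h | h <;> simp [h]

-- ===== VERDICT (by name: the statement is the Claim_ definition above) =====
theorem is_odious_spec : Claim_equal_is_odious := by
  intro num _
  unfold Spec_is_odious
  exact is_odious_eq num
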